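-- pv_equiv track=rewrite | github.com/tagore8661/accenture-coding-practice | Previous-Coding-Questions/Question-20.py | total_chocolates_A
-- ===== SOURCE A (Python) =====
-- def total_chocolates_A(chocolate_jars, N):
--     # Initialize total chocolates for student A
--     total_chocolates_A = 0
--
--     # Iterate over each jar in the list
--     for chocolates in chocolate_jars:
--         # While there are chocolates in the current jar
--         while chocolates > 0:
--             # Student A takes 1 chocolate if available
--             if chocolates > 0:
--                 total_chocolates_A += 1
--                 chocolates -= 1
--
--             # Student B takes 1 chocolate if available
--             if chocolates > 0:
--                 chocolates -= 1
--
--             # Student C takes 1 chocolate if available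
--             if chocolates > 0:
--                 chocolates -= 1
--
--     return total_chocolates_A
-- ===== SOURCE B (Python) =====
-- def total_chocolates_A(chocolate_jars, N):
--     # Per round-robin pass A takes exactly 1 chocolate, so A gets ceil(c/3) from a jar of c > 0.
--     return sum((c + 2) // 3 for c in chocolate_jars if c > 0)
-- ===== Notes on version B (the rewrite author's own statement) =====
-- stated objective: simpler
-- what changed: Replaces the per-chocolate round-robin simulation (nested while loop) with a one-line sum of the closed form ceil(c/3) = (c+2)//3 over the positive jars.
import Mathlib
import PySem

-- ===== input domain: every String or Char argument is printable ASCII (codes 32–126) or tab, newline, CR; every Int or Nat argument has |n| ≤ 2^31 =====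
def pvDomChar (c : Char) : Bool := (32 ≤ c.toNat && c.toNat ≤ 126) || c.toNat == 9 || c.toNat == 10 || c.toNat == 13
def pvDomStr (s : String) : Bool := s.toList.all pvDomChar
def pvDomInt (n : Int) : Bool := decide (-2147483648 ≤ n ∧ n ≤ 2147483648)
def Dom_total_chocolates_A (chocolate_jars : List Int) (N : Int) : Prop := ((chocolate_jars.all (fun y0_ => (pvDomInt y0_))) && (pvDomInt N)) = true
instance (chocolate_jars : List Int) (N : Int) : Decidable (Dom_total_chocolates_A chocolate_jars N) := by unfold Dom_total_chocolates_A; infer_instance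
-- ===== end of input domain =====

-- B replaces A's per-chocolate round-robin simulation with the closed form ceil(c/3) per jar (simpler: a one-line sum).


-- ===== PORT A =====
-- A's inner 'while chocolates > 0' loop over one jar, carrying the running
-- total: each pass A takes one (total += 1, c -= 1), then B and C each take one
-- if any remain.  The loop removes at least one chocolate per pass, so
-- fuel = c.toNat bounds it (totality guard only; the loop body is unchanged).
def pvJarLoopA (fuel : Nat) (total : Int) (c : Int) : Int :=
  match fuel with
  | 0 => total
  | fuel + 1 =>
    if c > 0 then
      let c1 := c - 1
      let c2 := if c1 > 0 then c1 - 1 else c1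
      let c3 := if c2 > 0 then c2 - 1 else c2
      pvJarLoopA fuel (total + 1) c3
    else total

def total_chocolates_A (chocolate_jars : List Int) (N : Int) : Int :=
  chocolate_jars.foldl (fun total chocolates => pvJarLoopA chocolates.toNat total chocolates) 0

-- ===== PORT B =====
def total_chocolates_A_alt (chocolate_jars : List Int) (N : Int) : Int :=
  chocolate_jars.foldl (fun s c => if c > 0 then s + PySem.Int.floordiv (c + 2) 3 else s) 0

-- ===== PRECONDITION & SPEC =====
def Spec_total_chocolates_A (chocolate_jars : List Int) (N : Int) (out : Int) : Prop := out = total_chocolates_A_alt chocolate_jars N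
instance (chocolate_jars : List Int) (N : Int) (out : Int) : Decidable (Spec_total_chocolates_A chocolate_jars N out) := by unfold Spec_total_chocolates_A; infer_instance

-- ===== CLAIM (what is proved, stated in full; the proofs are below) =====
def Claim_equal_total_chocolates_A : Prop := ∀ (chocolate_jars : List Int) (N : Int), Dom_total_chocolates_A chocolate_jars N → Spec_total_chocolates_A chocolate_jars N (total_chocolates_A chocolate_jars N)

-- ===== LEMMAS AND PROOFS =====
theorem pvJarLoopA_closed (fuel : Nat) : ∀ (total c : Int), c.toNat ≤ fuel →
    pvJarLoopA fuel total c = total + (if c > 0 then PySem.Int.floordiv (c + 2) 3 else 0) := by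
  induction fuel with
  | zero =>
      intro total c hc
      have h : ¬ c > 0 := by omega
      simp [pvJarLoopA, h]
  | succ n ih =>
      intro total c hc
      by_cases h : c > 0
      · simp only [pvJarLoopA, h, if_pos]
        have hX : (if (if c - 1 > 0 then c - 1 - 1 else c - 1) > 0
              then (if c - 1 > 0 then c - 1 - 1 else c - 1) - 1
              else if c - 1 > 0 then c - 1 - 1 else c - 1) = (if c ≥ 4 then c - 3 else 0) := by
          split_ifs <;> omega
        rw [hX]
        by_cases h4 : c ≥ 4
        · rw [if_pos h4, ih (total + 1) (c - 3) (by omega), if_pos (show c - 3 > 0 by omega),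
            PySem.Int.floordiv_eq_ediv_of_pos (show (0:Int) < 3 by omega),
            PySem.Int.floordiv_eq_ediv_of_pos (show (0:Int) < 3 by omega)]
          omega
        · rw [if_neg h4, ih (total + 1) 0 (by omega)]
          simp only [show ¬ (0:Int) > 0 by omega, if_false]
          rw [PySem.Int.floordiv_eq_ediv_of_pos (show (0:Int) < 3 by omega)]
          omega
      · simp [pvJarLoopA, h]

-- ===== VERDICT (by name: the statement is the Claim_ definition above) =====
theorem total_chocolates_A_spec : Claim_equal_total_chocolates_A := by
  intro jars N hdom
  unfold Spec_total_chocolates_A total_chocolates_A total_chocolates_A_alt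
  clear hdom
  induction jars using List.reverseRecOn with
  | nil => rfl
  | append_singleton xs x ih =>
      simp only [List.foldl_append, List.foldl_cons, List.foldl_nil]
      rw [pvJarLoopA_closed x.toNat _ x le_rfl, ih]
      split_ifs <;> omega
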